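-- pv_equiv track=rewrite | github.com/RosettaCommons/tools | python_cc_reader/beautifier_tests.py | replace_leading_spaces_w_tabs
-- ===== SOURCE A (Python) =====
-- def replace_leading_spaces_w_tabs( line ) :
--     # print "line", line
--     newline = []
--     found_non_space = False
--     i = 0
--     while i+4 < len(line) :
--         # print i, line[i:(i+4)]
--         if line[i:(i+4)] == "    " :
--             newline.append( "\t" )
--             i+=4
--         else :
--             found_non_space = True
--             break
--
--     # now look at the characters we didn't examine; are any of them non-whitespace?
--     for i in range(i,len(line)) :
--         if line[i] != " " and line[i] != "\n" and line[i] != "\t" :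
--             found_non_space = True
--
--     if found_non_space :
--         newline.append( line.strip() )
--         newline.append( "\n" )
--         return "".join(newline)
--     else :
--         return "\n"
-- ===== SOURCE B (Python) =====
-- def replace_leading_spaces_w_tabs(line):
--     stripped = line.strip()
--     if stripped == "":
--         return "\n"
--     ntabs = (len(line) - len(line.lstrip(" "))) // 4
--     return "\t" * ntabs + stripped + "\n"
-- ===== Notes on version B (the rewrite author's own statement) =====
-- stated objective: simpler
-- what changed: Replaced the 4-char-group consuming while loop plus the remainder-scanning for loop and list accumulator by a closed-form leading-space count (length minus length after stripping leading spaces) divided by 4, with an up-front blank-line test on the stripped line.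
-- intended difference: On whitespace-only lines that begin with at least four spaces and whose remaining whitespace still trips the scanner (a mismatched 4-char group before the end, or a carriage return, which A's for loop wrongly treats as non-whitespace), A returns the already-emitted tabs followed by a newline while B returns a bare newline, the intended output for a blank line. — e.g. on replace_leading_spaces_w_tabs(" \r"): A returns "\t\n", B returns "\n"
import Mathlib
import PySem

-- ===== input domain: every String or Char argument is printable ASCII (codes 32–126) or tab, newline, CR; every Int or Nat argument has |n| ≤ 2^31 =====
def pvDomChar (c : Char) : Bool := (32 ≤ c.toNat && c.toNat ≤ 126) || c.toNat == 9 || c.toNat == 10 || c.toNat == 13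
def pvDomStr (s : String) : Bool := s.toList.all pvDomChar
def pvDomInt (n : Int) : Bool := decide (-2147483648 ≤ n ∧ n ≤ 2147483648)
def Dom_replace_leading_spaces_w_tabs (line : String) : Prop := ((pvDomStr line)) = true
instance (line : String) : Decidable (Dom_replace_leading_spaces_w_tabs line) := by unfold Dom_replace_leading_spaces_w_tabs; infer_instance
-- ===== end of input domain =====

-- B replaces A's 4-char-group while loop and remainder-scan for loop by a blank-line test plus a
-- closed-form leading-space count divided by 4 (objective: simpler); on blank lines that A's scanner
-- mis-flags, B intentionally returns a bare newline (see D_ below).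

-- ===== PORT A =====
-- the while loop: consume leading "    " groups while i+4 < len(line); break (found=true) on a mismatch
def pvWhileA (l : List Char) (i : Nat) (acc : List String) : List String × Nat × Bool :=
  if _h : i + 4 < l.length then
    if (l.drop i).take 4 = [' ', ' ', ' ', ' '] then
      pvWhileA l (i + 4) (acc ++ ["\t"])
    else (acc, i, true)
  else (acc, i, false)
  termination_by l.length - i

def replace_leading_spaces_w_tabs (line : String) : String :=
  let l := line.toList
  let r := pvWhileA l 0 []
  -- for i in range(i, len(line)): flag any char that is not " ", "\n", "\t"
  let found := (l.drop r.2.1).foldl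
    (fun f c => if c ≠ ' ' ∧ c ≠ '\n' ∧ c ≠ '\t' then true else f) r.2.2
  if found then PySem.Str.join "" (r.1 ++ [PySem.Str.strip line, "\n"]) else "\n"

-- ===== PORT B =====
def replace_leading_spaces_w_tabs_alt (line : String) : String :=
  let stripped := PySem.Str.strip line
  if stripped = "" then "\n"
  else
    -- ntabs = (len(line) - len(line.lstrip(" "))) // 4   (lstrip(" ") drops leading ' ' only)
    let ntabs := (line.toList.length - (line.toList.dropWhile (· = ' ')).length) / 4
    String.ofList (List.replicate ntabs '\t') ++ stripped ++ "\n"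

-- ===== PRECONDITION & SPEC =====
-- number of tab groups A's while loop consumes: a formula over the input only
def pvKOf (l : List Char) : Nat :=
  min ((l.takeWhile (· = ' ')).length / 4) ((l.length - 1) / 4)

-- On whitespace-only lines that begin with at least four spaces and whose remaining whitespace still
-- trips the scanner (a mismatched 4-char group before the end, or a carriage return, which A's for
-- loop wrongly treats as non-whitespace), A returns the already-emitted tabs followed by a newline
-- while B returns a bare newline, the intended output for a blank line.
def D_replace_leading_spaces_w_tabs (line : String) : Prop :=
  PySem.Str.strip line = "" ∧ 1 ≤ pvKOf line.toList ∧
    (4 * pvKOf line.toList + 4 < line.toList.length ∨ '\r' ∈ line.toList.drop (4 * pvKOf line.toList))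
instance (line : String) : Decidable (D_replace_leading_spaces_w_tabs line) := by
  unfold D_replace_leading_spaces_w_tabs; infer_instance

def Spec_replace_leading_spaces_w_tabs (line : String) (out : String) : Prop :=
  ¬ D_replace_leading_spaces_w_tabs line → out = replace_leading_spaces_w_tabs_alt line
instance (line : String) (out : String) : Decidable (Spec_replace_leading_spaces_w_tabs line out) := by
  unfold Spec_replace_leading_spaces_w_tabs; infer_instance

def pvDiffWitness_replace_leading_spaces_w_tabs : String := "    \r"
def pvDiffWitnessOut_replace_leading_spaces_w_tabs : String × String := ("\t\n", "\n")

-- ===== CLAIM (what is proved, stated in full; the proofs are below) =====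
def Claim_unchanged_replace_leading_spaces_w_tabs : Prop := ∀ (line : String), Dom_replace_leading_spaces_w_tabs line → Spec_replace_leading_spaces_w_tabs line (replace_leading_spaces_w_tabs line)
def Claim_changed_replace_leading_spaces_w_tabs : Prop := Dom_replace_leading_spaces_w_tabs (pvDiffWitness_replace_leading_spaces_w_tabs) ∧ D_replace_leading_spaces_w_tabs (pvDiffWitness_replace_leading_spaces_w_tabs) ∧ replace_leading_spaces_w_tabs (pvDiffWitness_replace_leading_spaces_w_tabs) = pvDiffWitnessOut_replace_leading_spaces_w_tabs.1 ∧ replace_leading_spaces_w_tabs_alt (pvDiffWitness_replace_leading_spaces_w_tabs) = pvDiffWitnessOut_replace_leading_spaces_w_tabs.2 ∧ pvDiffWitnessOut_replace_leading_spaces_w_tabs.1 ≠ pvDiffWitnessOut_replace_leading_spaces_w_tabs.2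
def Claim_exact_replace_leading_spaces_w_tabs : Prop := ∀ (line : String), Dom_replace_leading_spaces_w_tabs line → D_replace_leading_spaces_w_tabs line → replace_leading_spaces_w_tabs line ≠ replace_leading_spaces_w_tabs_alt line

-- ===== LEMMAS AND PROOFS =====

-- the for loop is an 'any' over the unexamined suffix
lemma pv_foldl_any (cs : List Char) (b : Bool) :
    cs.foldl (fun f c => if c ≠ ' ' ∧ c ≠ '\n' ∧ c ≠ '\t' then true else f) b
      = (b || cs.any (fun c => decide (c ≠ ' ' ∧ c ≠ '\n' ∧ c ≠ '\t'))) := by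
  induction cs generalizing b with
  | nil => simp
  | cons c cs ih =>
    rw [List.foldl_cons, ih, List.any_cons]
    by_cases h : c ≠ ' ' ∧ c ≠ '\n' ∧ c ≠ '\t' <;>
      cases b <;> simp [h]

-- advancing the while loop over n all-space groups
lemma pvWhileA_adv (n : Nat) (l : List Char) (i : Nat) (acc : List String)
    (hsp : ∀ m (hm : m < l.length), i ≤ m → m < i + 4 * n → l[m] = ' ')
    (hlt : i + 4 * n < l.length) :
    pvWhileA l i acc = pvWhileA l (i + 4 * n) (acc ++ List.replicate n "\t") := by
  induction n generalizing i acc with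
  | zero => simp
  | succ n ih =>
    have h4 : i + 4 < l.length := by omega
    have hgrp : (l.drop i).take 4 = [' ', ' ', ' ', ' '] := by
      have hlen : ((l.drop i).take 4).length = 4 := by
        simp [List.length_take, List.length_drop]; omega
      refine List.ext_getElem ?_ ?_
      · simp [hlen]
      · intro j h1 h2
        have hj4 : j < 4 := by simpa using h2
        have hij : i + j < l.length := by omega
        rw [List.getElem_take, List.getElem_drop]
        have hsp' := hsp (i + j) hij (by omega) (by omega)
        have hlit : ∀ (m : Nat) (hm : m < ([' ', ' ', ' ', ' '] : List Char).length),
            ([' ', ' ', ' ', ' '] : List Char)[m] = ' ' := by decide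
        rw [hsp', hlit j (by simpa using hj4)]
    rw [pvWhileA]
    simp only [h4, hgrp, dif_pos, if_pos]
    rw [ih (i + 4) (acc ++ ["\t"]) (fun m hm h1 h2 => hsp m hm (by omega) (by omega)) (by omega)]
    congr 1
    · omega
    · simp [List.replicate_succ]

-- prefix of takeWhile: the first (takeWhile p l).length characters satisfy p
lemma pv_takeWhile_getElem {p : Char → Bool} (l : List Char) (m : Nat) (hm : m < l.length)
    (h : m < (l.takeWhile p).length) : p l[m] = true := by
  induction l generalizing m with
  | nil => simp at hm
  | cons a l ih =>
    by_cases hp : p a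
    · cases m with
      | zero => simpa using hp
      | succ m =>
        simp [hp] at h
        exact ih m (by simpa using hm) (by omega)
    · simp [hp] at h
-- the character just after the takeWhile prefix fails p
lemma pv_takeWhile_next {p : Char → Bool} (l : List Char)
    (h : (l.takeWhile p).length < l.length) : p l[(l.takeWhile p).length] = false := by
  induction l with
  | nil => simp at h
  | cons a l ih =>
    by_cases hp : p a
    · simp only [List.takeWhile_cons, hp] at h ⊢
      simpa using ih (by simpa using h)
    · simpa [List.takeWhile_cons, hp] using hp

-- characterisation of the while loop run from the start
lemma pvWhileA_main (l : List Char) :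
    pvWhileA l 0 [] = (List.replicate (pvKOf l) "\t", 4 * pvKOf l,
      decide (4 * pvKOf l + 4 < l.length)) := by
  have hdef : pvKOf l = min ((l.takeWhile (· = ' ')).length / 4) ((l.length - 1) / 4) := rfl
  have hsle : (l.takeWhile (· = ' ')).length ≤ l.length :=
    (List.takeWhile_prefix (l := l) (p := (· = ' '))).length_le
  rcases Nat.eq_zero_or_pos l.length with hlen | hlen
  · have hk0 : pvKOf l = 0 := by rw [hdef]; omega
    rw [pvWhileA]
    simp [hlen, hk0]
  · have hm1 := Nat.mul_div_le (l.length - 1) 4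
    have hm2 := Nat.mul_div_le (l.takeWhile (· = ' ')).length 4
    have hkb : 4 * pvKOf l ≤ l.length - 1 := by omega
    have hks : 4 * pvKOf l ≤ (l.takeWhile (· = ' ')).length := by omega
    have hadv := pvWhileA_adv (pvKOf l) l 0 []
      (fun m hm _ h2 => by
        have hm' : m < (l.takeWhile (· = ' ')).length := by omega
        have := pv_takeWhile_getElem (p := (· = ' ')) l m hm hm'
        simpa using this)
      (by omega)
    rw [hadv]
    simp only [List.nil_append, Nat.zero_add]
    by_cases hbr : 4 * pvKOf l + 4 < l.length
    · -- loop breaks on a mismatched group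
      have hkeq : pvKOf l = (l.takeWhile (· = ' ')).length / 4 := by
        have h1 : pvKOf l + 1 ≤ (l.length - 1) / 4 :=
          Nat.le_div_iff_mul_le (by omega) |>.2 (by omega)
        omega
      have hslt : (l.takeWhile (· = ' ')).length < 4 * pvKOf l + 4 := by
        have h1 := Nat.div_add_mod (l.takeWhile (· = ' ')).length 4
        omega
      have hsllen : (l.takeWhile (· = ' ')).length < l.length := by omega
      have hns : l[(l.takeWhile (· = ' ')).length]'hsllen ≠ ' ' := by
        have := pv_takeWhile_next (p := (· = ' ')) l hsllen
        simpa using this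
      have hgrp : (l.drop (4 * pvKOf l)).take 4 ≠ [' ', ' ', ' ', ' '] := by
        intro hEq
        have hjlen : (l.takeWhile (· = ' ')).length - 4 * pvKOf l
            < ((l.drop (4 * pvKOf l)).take 4).length := by
          simp [List.length_take, List.length_drop]; omega
        have hval : ((l.drop (4 * pvKOf l)).take 4)[(l.takeWhile (· = ' ')).length - 4 * pvKOf l]'hjlen
            = l[(l.takeWhile (· = ' ')).length]'hsllen := by
          rw [List.getElem_take, List.getElem_drop]
          congr 1
          omega
        apply hns
        rw [← hval, List.getElem_of_eq hEq]
        have hlit : ∀ (m : Nat) (hm : m < ([' ', ' ', ' ', ' '] : List Char).length),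
            ([' ', ' ', ' ', ' '] : List Char)[m] = ' ' := by decide
        exact hlit _ _
      rw [pvWhileA]
      simp [hbr, hgrp]
    · rw [pvWhileA]
      simp [hbr]

-- whitespace-only characterisation of strip
lemma pv_strip_nil_iff (l : List Char) :
    PySem.Chars.strip l = [] ↔ ∀ c ∈ l, PySem.Chars.isspace c = true := by
  unfold PySem.Chars.strip PySem.Chars.rstrip PySem.Chars.lstrip
  constructor
  · intro h c hc
    rcases List.dropWhile_eq_nil_iff.1 (by
      have := congrArg List.reverse h
      simpa using this) with h'
    by_cases hmem : c ∈ List.dropWhile PySem.Chars.isspace l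
    · exact h' c (by simpa using hmem)
    · by_contra hns
      have : c ∈ List.takeWhile PySem.Chars.isspace l ++ List.dropWhile PySem.Chars.isspace l := by
        rw [List.takeWhile_append_dropWhile]; exact hc
      rcases List.mem_append.1 this with h1 | h1
      · exact hns (List.mem_takeWhile_imp h1)
      · exact hmem h1
  · intro h
    have h1 : List.dropWhile PySem.Chars.isspace l = [] :=
      List.dropWhile_eq_nil_iff.2 h
    simp [h1]

lemma pv_strip_str_nil_iff (line : String) :
    PySem.Str.strip line = "" ↔ ∀ c ∈ line.toList, PySem.Chars.isspace c = true := by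
  rw [← pv_strip_nil_iff]
  constructor
  · intro h
    have := congrArg String.toList h
    simpa [PySem.Str.toList_strip] using this
  · intro h
    have : (PySem.Str.strip line).toList = ("" : String).toList := by
      simpa [PySem.Str.toList_strip] using h
    exact String.toList_injective this

-- length of the leading-space prefix via dropWhile (what B computes)
lemma pv_len_sub_dropWhile (l : List Char) :
    l.length - (l.dropWhile (· = ' ')).length = (l.takeWhile (· = ' ')).length := by
  have h := congrArg List.length (List.takeWhile_append_dropWhile (p := (· = ' ')) (l := l))
  rw [List.length_append] at h
  omega

-- ''-join of a list ending in two pieces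
lemma pv_join_nil_flat (ps : List (List Char)) (q r : List Char) :
    PySem.Chars.join [] (ps ++ [q, r]) = ps.flatten ++ q ++ r := by
  induction ps with
  | nil => simp [PySem.Chars.join_cons_cons, PySem.Chars.join_singleton]
  | cons p ps ih =>
    cases ps with
    | nil => simp [PySem.Chars.join_cons_cons, PySem.Chars.join_singleton]
    | cons p' ps' =>
      simp only [List.cons_append] at ih ⊢
      rw [PySem.Chars.join_cons_cons, ih]
      simp

-- joining k tabs, the stripped line and a newline
lemma pv_join_tabs (k : Nat) (st : String) :
    PySem.Str.join "" (List.replicate k "\t" ++ [st, "\n"])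
      = String.ofList (List.replicate k '\t') ++ st ++ "\n" := by
  apply String.toList_injective
  rw [PySem.Str.toList_join]
  simp only [List.map_append, List.map_cons, List.map_nil, List.map_replicate]
  have h := pv_join_nil_flat (List.replicate k ("\t".toList)) st.toList ("\n".toList)
  rw [show ("" : String).toList = [] from rfl, h]
  simp [String.toList_append]

-- a Dom character that is whitespace is ' ', tab, newline or CR
lemma pv_dom_isspace (c : Char) (hd : pvDomChar c = true)
    (hs : PySem.Chars.isspace c = true) : c = ' ' ∨ c = '\t' ∨ c = '\n' ∨ c = '\r' := by
  unfold pvDomChar at hd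
  unfold PySem.Chars.isspace at hs
  simp at hd hs
  have hval : c.toNat = 32 ∨ c.toNat = 9 ∨ c.toNat = 10 ∨ c.toNat = 13 := by omega
  rcases hval with h | h | h | h
  · exact Or.inl (Char.ext (UInt32.toNat_inj.mp h))
  · exact Or.inr (Or.inl (Char.ext (UInt32.toNat_inj.mp h)))
  · exact Or.inr (Or.inr (Or.inl (Char.ext (UInt32.toNat_inj.mp h))))
  · exact Or.inr (Or.inr (Or.inr (Char.ext (UInt32.toNat_inj.mp h))))

-- membership + whitespace facts used by both verdict theorems
lemma pv_not_P_of_ws (c : Char) (hd : pvDomChar c = true)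
    (hs : PySem.Chars.isspace c = true) (hr : c ≠ '\r') :
    decide (c ≠ ' ' ∧ c ≠ '\n' ∧ c ≠ '\t') = false := by
  rcases pv_dom_isspace c hd hs with h | h | h | h <;> simp [h] at hr ⊢

lemma pv_P_of_not_ws (c : Char) (hs : PySem.Chars.isspace c = false) :
    decide (c ≠ ' ' ∧ c ≠ '\n' ∧ c ≠ '\t') = true := by
  refine decide_eq_true ⟨?_, ?_, ?_⟩ <;> rintro rfl <;> simp [PySem.Chars.isspace] at hs

-- the shared evaluation of port A through the loop characterisations
lemma pv_A_eval (line : String) :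
    replace_leading_spaces_w_tabs line =
      (if (decide (4 * pvKOf line.toList + 4 < line.toList.length)
            || (line.toList.drop (4 * pvKOf line.toList)).any
                 (fun c => decide (c ≠ ' ' ∧ c ≠ '\n' ∧ c ≠ '\t'))) = true
        then PySem.Str.join ""
          (List.replicate (pvKOf line.toList) "\t" ++ [PySem.Str.strip line, "\n"])
        else "\n") := by
  rw [replace_leading_spaces_w_tabs]
  simp only [pvWhileA_main, pv_foldl_any]

theorem pv_main (line : String) (hdom : Dom_replace_leading_spaces_w_tabs line)
    (hnd : ¬ D_replace_leading_spaces_w_tabs line) :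
    replace_leading_spaces_w_tabs line = replace_leading_spaces_w_tabs_alt line := by
  have hdom' : ∀ c ∈ line.toList, pvDomChar c = true := by
    intro c hc
    exact List.all_eq_true.1 hdom c hc
  have hsplit := List.takeWhile_append_dropWhile (p := (· = ' ')) (l := line.toList)
  have hlen_eq := pv_len_sub_dropWhile line.toList
  have hlen_sum : (line.toList.takeWhile (· = ' ')).length
      + (line.toList.dropWhile (· = ' ')).length = line.toList.length := by
    have h := congrArg List.length hsplit
    rw [List.length_append] at h
    omega
  have hkdef : pvKOf line.toList = min ((line.toList.takeWhile (· = ' ')).length / 4)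
      ((line.toList.length - 1) / 4) := rfl
  rw [pv_A_eval, replace_leading_spaces_w_tabs_alt]
  by_cases hstrip : PySem.Str.strip line = ""
  · -- whitespace-only line
    have hws : ∀ c ∈ line.toList, PySem.Chars.isspace c = true :=
      (pv_strip_str_nil_iff line).1 hstrip
    rw [D_replace_leading_spaces_w_tabs] at hnd
    rcases Nat.eq_zero_or_pos (pvKOf line.toList) with hk0 | hk1
    · -- no tabs were emitted: both branches of A give "\n"
      rw [hk0, hstrip]
      have hj : PySem.Str.join "" (List.replicate 0 "\t" ++ ["", "\n"]) = "\n" := by decide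
      split
      · rw [hj]; simp
      · simp
    · -- tabs were emitted, but ¬D_ says the scanner is never tripped
      have hno1 : ¬ (4 * pvKOf line.toList + 4 < line.toList.length) :=
        fun h => hnd ⟨hstrip, hk1, Or.inl h⟩
      have hno2 : '\r' ∉ line.toList.drop (4 * pvKOf line.toList) :=
        fun h => hnd ⟨hstrip, hk1, Or.inr h⟩
      have hany : (line.toList.drop (4 * pvKOf line.toList)).any
          (fun c => decide (c ≠ ' ' ∧ c ≠ '\n' ∧ c ≠ '\t')) = false := by
        rw [List.any_eq_false]
        intro c hc
        have hcl : c ∈ line.toList := List.mem_of_mem_drop hc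
        have hcr : c ≠ '\r' := by
          rintro rfl
          exact hno2 hc
        simp [pv_not_P_of_ws c (hdom' c hcl) (hws c hcl) hcr]
      have hbr : decide (4 * pvKOf line.toList + 4 < line.toList.length) = false := by
        simpa using hno1
      rw [hany, hstrip, hbr]
      simp
  · -- line with real content
    have hex : ∃ c ∈ line.toList, PySem.Chars.isspace c = false := by
      by_contra hall
      have hall' : ∀ c ∈ line.toList, PySem.Chars.isspace c = true := by
        intro c hc
        by_contra hne
        exact hall ⟨c, hc, by simpa using hne⟩
      exact hstrip ((pv_strip_str_nil_iff line).2 hall')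
    obtain ⟨c, hc, hcs⟩ := hex
    have hcsp : c ≠ ' ' := by
      rintro rfl
      simp [PySem.Chars.isspace] at hcs
    have hcdrop : c ∈ line.toList.dropWhile (· = ' ') := by
      have : c ∈ line.toList.takeWhile (· = ' ') ++ line.toList.dropWhile (· = ' ') := by
        rw [hsplit]; exact hc
      rcases List.mem_append.1 this with h | h
      · exact absurd (by simpa using List.mem_takeWhile_imp h) hcsp
      · exact h
    have hdnil : line.toList.dropWhile (· = ' ') ≠ [] := by
      intro h; rw [h] at hcdrop; simp at hcdrop
    have hdpos : 1 ≤ (line.toList.dropWhile (· = ' ')).length :=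
      Nat.one_le_iff_ne_zero.2 (by simpa using hdnil)
    have hkeq : pvKOf line.toList = (line.toList.takeWhile (· = ' ')).length / 4 := by
      rw [hkdef]
      omega
    have hks := Nat.mul_div_le (line.toList.takeWhile (· = ' ')).length 4
    have hany : (line.toList.drop (4 * pvKOf line.toList)).any
        (fun c => decide (c ≠ ' ' ∧ c ≠ '\n' ∧ c ≠ '\t')) = true := by
      rw [List.any_eq_true]
      refine ⟨c, ?_, pv_P_of_not_ws c hcs⟩
      have h1 := List.drop_append_of_le_length
        (l₁ := line.toList.takeWhile (· = ' ')) (l₂ := line.toList.dropWhile (· = ' '))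
        (i := 4 * pvKOf line.toList) (by omega)
      rw [hsplit] at h1
      rw [h1]
      exact List.mem_append_right _ hcdrop
    rw [hany]
    simp only [Bool.or_true, if_pos, if_neg hstrip]
    rw [pv_join_tabs, hlen_eq, hkeq]

-- ===== VERDICT (by name: the statement is the Claim_ definition above) =====
theorem replace_leading_spaces_w_tabs_spec : Claim_unchanged_replace_leading_spaces_w_tabs := by
  intro line hdom hnd
  exact pv_main line hdom hnd

theorem replace_leading_spaces_w_tabs_changed : Claim_changed_replace_leading_spaces_w_tabs := by
  unfold Claim_changed_replace_leading_spaces_w_tabs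
  refine ⟨by decide, by decide, ?_, by decide, by decide⟩
  rw [show pvDiffWitness_replace_leading_spaces_w_tabs = "    \r" from rfl, pv_A_eval]
  decide

theorem replace_leading_spaces_w_tabs_tight : Claim_exact_replace_leading_spaces_w_tabs := by
  intro line hdom hD
  obtain ⟨hstrip, hk1, hor⟩ := hD
  have hfound : (decide (4 * pvKOf line.toList + 4 < line.toList.length)
      || (line.toList.drop (4 * pvKOf line.toList)).any
           (fun c => decide (c ≠ ' ' ∧ c ≠ '\n' ∧ c ≠ '\t'))) = true := by
    rcases hor with h | h
    · rw [decide_eq_true h, Bool.true_or]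
    · have hh : (line.toList.drop (4 * pvKOf line.toList)).any
          (fun c => decide (c ≠ ' ' ∧ c ≠ '\n' ∧ c ≠ '\t')) = true :=
        List.any_eq_true.2 ⟨'\r', h, by decide⟩
      rw [hh, Bool.or_true]
  rw [pv_A_eval, hfound, if_pos rfl, hstrip, pv_join_tabs,
    replace_leading_spaces_w_tabs_alt]
  simp only [hstrip, if_pos]
  intro heq
  have := congrArg (fun s => s.toList.length) heq
  simp [String.toList_append] at this
  omega
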